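-- pv_equiv track=rewrite | github.com/jesuslmo/Python-3-Specialization-by-Michigan | Python Functions, Files, and Dictionaries/Assessment More about Iteration.py | beginning
-- ===== SOURCE A (Python) =====
-- def beginning(list):
--     i=0
--     list2=[]
--     while i<len(list) :
--         if list[i]=="bye":
--             break
--         if len(list2)<10:
--             list2.append(list[i])
--         i+=1
--     return list2
-- ===== SOURCE B (Python) =====
-- def beginning(list):
--     cut = list.index("bye") if "bye" in list else len(list)
--     return list[:min(cut, 10)]
-- ===== Notes on version B (the rewrite author's own statement) =====
-- stated objective: simpler
-- what changed: Replaced the index-driven while loop with a running counter and conditional appends by computing the cut point (position of "bye", else the length) up front and returning a single slice of length min(cut, 10).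
import Mathlib
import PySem

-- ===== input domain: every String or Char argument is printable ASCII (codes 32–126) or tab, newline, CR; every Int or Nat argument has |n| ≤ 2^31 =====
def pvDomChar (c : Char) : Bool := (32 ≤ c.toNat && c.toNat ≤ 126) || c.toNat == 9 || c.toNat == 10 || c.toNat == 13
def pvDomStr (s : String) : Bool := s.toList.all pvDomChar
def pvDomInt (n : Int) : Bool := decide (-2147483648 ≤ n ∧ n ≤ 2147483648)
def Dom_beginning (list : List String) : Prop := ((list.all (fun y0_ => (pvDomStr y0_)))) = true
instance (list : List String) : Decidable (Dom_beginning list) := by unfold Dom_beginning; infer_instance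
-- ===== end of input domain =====

-- B computes the cut point ("bye"'s index, else the length) up front and returns one slice
-- of length min(cut,10), instead of A's index-driven while loop with conditional appends (objective: simpler).


-- ===== PORT A =====
-- the while loop: state (i, list2), break on "bye", append while len(list2) < 10
def beginningGo (list : List String) (i : Nat) (list2 : List String) : List String :=
  if h : i < list.length then
    if list[i] = "bye" then list2
    else beginningGo list (i + 1) (if list2.length < 10 then list2 ++ [list[i]] else list2)
  else list2
termination_by list.length - i

def beginning (list : List String) : List String :=
  beginningGo list 0 []

-- ===== PORT B =====
def beginning_alt (list : List String) : List String :=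
  let cut : Nat :=
    match PySem.List.index? list "bye" with
    | some c => c
    | none => list.length
  PySem.List.slice list none (some ((min cut 10 : Nat) : Int))

-- ===== PRECONDITION & SPEC =====
def Spec_beginning (list : List String) (out : List String) : Prop := out = beginning_alt list
instance (list : List String) (out : List String) : Decidable (Spec_beginning list out) := by unfold Spec_beginning; infer_instance

-- ===== CLAIM (what is proved, stated in full; the proofs are below) =====
def Claim_equal_beginning : Prop := ∀ (list : List String), Dom_beginning list → Spec_beginning list (beginning list)

-- ===== LEMMAS AND PROOFS =====

-- A's loop builds acc ++ (up to 10 - |acc| of the elements before the first "bye" from position i on)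
theorem beginningGo_eq (list : List String) (i : Nat) (acc : List String) :
    beginningGo list i acc =
      acc ++ (((list.drop i).takeWhile (fun s => s != "bye")).take (10 - acc.length)) := by
  unfold beginningGo
  split
  · rename_i h
    have hdrop : list.drop i = list[i] :: list.drop (i + 1) := List.drop_eq_getElem_cons h
    split
    · rename_i hb
      simp [hdrop, hb]
    · rename_i hb
      rw [beginningGo_eq list (i + 1)]
      by_cases hlen : acc.length < 10
      · rw [if_pos hlen, hdrop, List.takeWhile_cons]
        have hba : (list[i] != "bye") = true := by simp [hb]
        have h10 : 10 - acc.length = (10 - (acc ++ [list[i]]).length) + 1 := by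
          simp; omega
        rw [hba, if_pos rfl, h10, List.take_succ_cons, List.append_assoc, List.singleton_append]
      · have h0 : 10 - acc.length = 0 := by omega
        simp [hlen, h0]
  · rename_i h
    have hd : list.drop i = [] := List.drop_eq_nil_of_le (by omega)
    simp [hd]
termination_by list.length - i

theorem takeWhile_pre (pre suf : List String) (hp : "bye" ∉ pre) :
    ((pre ++ "bye" :: suf).takeWhile (fun s => s != "bye")) = pre := by
  induction pre with
  | nil => simp
  | cons x xs ih =>
    simp only [List.mem_cons, not_or] at hp
    have hx : (x != "bye") = true := by simpa using (Ne.symm hp.1)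
    simp [List.cons_append, hx, ih hp.2]

theorem takeWhile_all (l : List String) (h : "bye" ∉ l) :
    (l.takeWhile (fun s => s != "bye")) = l := by
  rw [List.takeWhile_eq_self_iff]
  intro x hx
  simp only [bne_iff_ne, ne_eq]
  rintro rfl; exact h hx

-- ===== VERDICT (by name: the statement is the Claim_ definition above) =====
theorem beginning_spec : Claim_equal_beginning := by
  intro list _
  unfold Spec_beginning beginning beginning_alt
  rw [beginningGo_eq]
  simp only [List.drop_zero, List.nil_append, List.length_nil, Nat.sub_zero]
  rw [PySem.List.slice_to_natCast]
  rcases hidx : PySem.List.index? list "bye" with _ | c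
  · have hnm : "bye" ∉ list := (PySem.List.index?_eq_none_iff list "bye").mp hidx
    rw [takeWhile_all list hnm]
    rcases Nat.le_total list.length 10 with h | h
    · rw [min_eq_left h, List.take_of_length_le h, List.take_of_length_le (le_refl _)]
    · rw [min_eq_right h]
  · obtain ⟨pre, suf, rfl, hlen, hnm⟩ := (PySem.List.index?_eq_some_iff list "bye" c).mp hidx
    rw [takeWhile_pre pre suf hnm, min_comm, ← List.take_take, ← hlen, List.take_left]
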